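-- pv_equiv track=rewrite | github.com/Vailish/ZICO_Algorithm_Study | team/김성준/1~2차(2022.08.01~11.9)/13주차(2022.10.21~10.24)/01_prog_12977_소수_만들기/s2.py | solution
-- ===== SOURCE A (Python) =====
-- def solution(n):
--     arr = [[0] * k + [-1] * (n-k) for k in range(1, n+1)]
--     r, c = 0, 0
--     direction = 0
--     arr[r][c] = 1
--     for t in range(2, (n * (n+1) //2 )+1):
--
--         # 전진
--         nr = r + [1, 0, -1][direction]  # 하 우 좌상
--         nc = c + [0, 1, -1][direction]
--
--         if 0 <= nr < n and 0 <= nc < n and arr[nr][nc] == 0: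
--             arr[nr][nc] = t
--             r, c = nr, nc
--
--         else:
--             direction = (direction +1) % 3
--             nr = r + [1, 0, -1][direction]  # 하 우 좌상
--             nc = c + [0, 1, -1][direction]
--             arr[nr][nc] = t
--             r, c = nr, nc
--
--     # 출력
--     result = []
--     for num in range(n):
--         for num2 in range(n):
--             if num >= num2:
--                 result.append(arr[num][num2])
--     return result
-- ===== SOURCE B (Python) =====
-- def _value(n, r, c):
--     # closed-form spiral value at lower-triangle cell (r, c):
--     # layer index, side of the layer's sub-triangle, cells consumed by outer layers
--     s = min(c, n - 1 - r, r - c)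
--     m = n - 3 * s
--     b = (n * (n + 1) - m * (m + 1)) // 2
--     if c - s == 0:                 # left (downward) edge of the layer
--         return b + (r - 2 * s) + 1
--     elif r == n - 1 - s:           # bottom (rightward) edge
--         return b + m + (c - s)
--     else:                          # diagonal (up-left) edge
--         return b + 3 * m - 2 - (r - 2 * s)
--
-- def solution(n):
--     result = []
--     for r in range(n):
--         for c in range(r + 1):
--             result.append(_value(n, r, c))
--     return result
-- ===== Notes on version B (the rewrite author's own statement) =====
-- stated objective: alternative
-- what changed: Replaces the cell-by-cell snake simulation (mutable n-by-n grid, cycling direction index, bounce-on-block test) with a per-cell closed form: each lower-triangle cell's value is computed directly from its layer index min(c, n-1-r, r-c) and its edge within that layer, so no grid and no simulation at all; O(1) auxiliary space instead of an n-by-n grid.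
import Mathlib
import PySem

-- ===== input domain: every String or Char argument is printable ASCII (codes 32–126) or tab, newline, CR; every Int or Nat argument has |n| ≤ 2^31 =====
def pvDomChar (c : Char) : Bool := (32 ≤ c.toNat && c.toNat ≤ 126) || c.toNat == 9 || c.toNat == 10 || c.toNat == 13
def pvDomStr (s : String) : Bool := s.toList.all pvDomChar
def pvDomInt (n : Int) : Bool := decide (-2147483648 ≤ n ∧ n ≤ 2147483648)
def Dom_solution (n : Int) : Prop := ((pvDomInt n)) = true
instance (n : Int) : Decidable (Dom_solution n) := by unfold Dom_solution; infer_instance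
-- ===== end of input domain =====

-- B replaces A's cell-by-cell snake simulation on a mutable grid with a per-cell
-- closed form (layer index + edge offset); alternative algorithm, O(1) auxiliary space.


-- ===== PORT A =====
-- arr[nr][nc] = t  (both indices are provably in range whenever executed on 1 ≤ n;
-- pySetD/pyGetD are exact there)
def pvSet2 (arr : List (List Int)) (i j v : Int) : List (List Int) :=
  PySem.List.pySetD arr i (PySem.List.pySetD (PySem.List.pyGetD arr i []) j v)

-- one iteration of A's `for t in range(2, n*(n+1)//2 + 1)` loop; state = (arr, r, c, direction)
def pvStep (n : Int) (st : List (List Int) × Int × Int × Int) (t : Int) :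
    List (List Int) × Int × Int × Int :=
  let arr := st.1; let r := st.2.1; let c := st.2.2.1; let direction := st.2.2.2
  let nr := r + PySem.List.pyGetD [1, 0, -1] direction 0
  let nc := c + PySem.List.pyGetD [0, 1, -1] direction 0
  if 0 ≤ nr ∧ nr < n ∧ 0 ≤ nc ∧ nc < n ∧
      PySem.List.pyGetD (PySem.List.pyGetD arr nr []) nc 0 = 0 then
    (pvSet2 arr nr nc t, nr, nc, direction)
  else
    let direction := PySem.Int.mod (direction + 1) 3
    let nr := r + PySem.List.pyGetD [1, 0, -1] direction 0
    let nc := c + PySem.List.pyGetD [0, 1, -1] direction 0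
    (pvSet2 arr nr nc t, nr, nc, direction)

def solution (n : Int) : List Int :=
  -- arr = [[0]*k + [-1]*(n-k) for k in range(1, n+1)]  ([x]*k is empty for k ≤ 0, exact)
  let arr0 := (PySem.List.pyRange 1 (n + 1) 1).map
    (fun k => List.replicate k.toNat (0 : Int) ++ List.replicate (n - k).toNat (-1 : Int))
  -- r, c = 0, 0 ; direction = 0 ; arr[r][c] = 1
  let st0 : List (List Int) × Int × Int × Int := (pvSet2 arr0 0 0 1, 0, 0, 0)
  let st := (PySem.List.pyRange 2 (PySem.Int.floordiv (n * (n + 1)) 2 + 1) 1).foldl (pvStep n) st0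
  let arr := st.1
  -- output loop (arr[num][num2] has both indices in range; pyGetD exact)
  (PySem.List.pyRange 0 n 1).foldl (fun res num =>
    (PySem.List.pyRange 0 n 1).foldl (fun res num2 =>
      if num2 ≤ num then res ++ [PySem.List.pyGetD (PySem.List.pyGetD arr num []) num2 0]
      else res) res) []

-- ===== PORT B =====
-- closed-form spiral value at lower-triangle cell (r, c) (Source B's _value)
def pvValue (n r c : Int) : Int :=
  let s := min c (min (n - 1 - r) (r - c))
  let m := n - 3 * s
  let b := PySem.Int.floordiv (n * (n + 1) - m * (m + 1)) 2
  if c - s = 0 then b + (r - 2 * s) + 1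
  else if r = n - 1 - s then b + m + (c - s)
  else b + 3 * m - 2 - (r - 2 * s)

def solution_alt (n : Int) : List Int :=
  (PySem.List.pyRange 0 n 1).foldl (fun res r =>
    (PySem.List.pyRange 0 (r + 1) 1).foldl (fun res c => res ++ [pvValue n r c]) res) []

-- ===== PRECONDITION & SPEC =====
-- A indexes arr[0][0] unconditionally, so it raises IndexError for every n ≤ 0.
def Pre_solution (n : Int) : Prop := 1 ≤ n
instance (n : Int) : Decidable (Pre_solution n) := by unfold Pre_solution; infer_instance
def pvWitness_solution : Int := 3

def Spec_solution (n : Int) (out : List Int) : Prop := out = solution_alt n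
instance (n : Int) (out : List Int) : Decidable (Spec_solution n out) := by unfold Spec_solution; infer_instance

-- ===== CLAIM (what is proved, stated in full; the proofs are below) =====
def Claim_equal_solution : Prop := ∀ (n : Int), Dom_solution n → Pre_solution n → Spec_solution n (solution n)

-- ===== LEMMAS AND PROOFS =====

-- the lower triangle of the n×n grid
def pvTri (n r c : Int) : Prop := 0 ≤ c ∧ c ≤ r ∧ r < n

-- total number of cells = n*(n+1)//2, as the port computes it
def pvTot (n : Int) : Int := PySem.Int.floordiv (n * (n + 1)) 2

-- which leg direction wrote cell (r, c): 0 = down, 1 = right, 2 = up-left diagonal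
def pvEdge (n r c : Int) : Int :=
  let s := min c (min (n - 1 - r) (r - c))
  if c - s = 0 then 0 else if r = n - 1 - s then 1 else 2

-- the grid as a function of (row, column)
def pvGrid (n : Int) (f : Int → Int → Int) : List (List Int) :=
  (List.range n.toNat).map (fun r : Nat => (List.range n.toNat).map (fun c : Nat => f ↑r ↑c))

-- contents of A's arr after values 1..t have been written
def pvMask (n t r c : Int) : Int :=
  if c ≤ r then (if pvValue n r c ≤ t then pvValue n r c else 0) else -1

-- A's loop invariant after step t
def pvInv (n t : Int) (st : List (List Int) × Int × Int × Int) : Prop :=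
  st.1 = pvGrid n (pvMask n t) ∧ pvTri n st.2.1 st.2.2.1 ∧
    pvValue n st.2.1 st.2.2.1 = t ∧ st.2.2.2 = pvEdge n st.2.1 st.2.2.1

-- row/column displacement of direction e, and the cycled next direction
def pvDr (e : Int) : Int := if e = 0 then 1 else if e = 1 then 0 else -1
def pvDc (e : Int) : Int := if e = 0 then 0 else if e = 1 then 1 else -1
def pvNext (e : Int) : Int := if e = 2 then 0 else e + 1

lemma pv_half (x k : Int) (h : x = 2 * k) : PySem.Int.floordiv x 2 = k := by
  rw [PySem.Int.floordiv_eq_ediv_of_pos (by omega)]; omega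

lemma pvTot_even (n : Int) : 2 * pvTot n = n * (n + 1) := by
  obtain ⟨k, hk⟩ := Int.even_mul_succ_self n
  rw [pvTot, pv_half _ k (by omega)]; omega

lemma pv_consec1 (a : Int) : 0 ≤ (a - 1) * (a - 2) := by
  rcases le_or_gt a 1 with h | h
  · have := mul_nonneg (show (0:Int) ≤ 1 - a by omega) (show (0:Int) ≤ 2 - a by omega)
    nlinarith [this]
  · exact mul_nonneg (by omega) (by omega)

lemma pv_consec2 (a : Int) : 0 ≤ (a - 2) * (a - 3) := by
  rcases le_or_gt a 2 with h | h
  · have := mul_nonneg (show (0:Int) ≤ 2 - a by omega) (show (0:Int) ≤ 3 - a by omega)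
    nlinarith [this]
  · exact mul_nonneg (by omega) (by omega)

-- layers at least 3 apart in side length have well separated cell-count prefixes
lemma pv_gap (m' m : Int) (h1 : 1 ≤ m') (h2 : m' ≤ m - 3) :
    6 * m - 6 ≤ m * (m + 1) - m' * (m' + 1) := by
  have h3 : 0 ≤ (m - 3 - m') * (m - 2 + m') := mul_nonneg (by omega) (by omega)
  have h4 : (m - 3 - m') * (m - 2 + m') = m * (m + 1) - (6 * m - 6) - m' * (m' + 1) := by ring
  omega

-- structured description of pvValue on a triangle cell
lemma pvValue_spec (n r c : Int) (h : pvTri n r c) :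
    ∃ s m b, s = min c (min (n - 1 - r) (r - c)) ∧ m = n - 3 * s ∧
      n * (n + 1) - m * (m + 1) = 2 * b ∧ 0 ≤ s ∧ 1 ≤ m ∧
      ((c = s ∧ 2 * s ≤ r ∧ r ≤ n - 1 - s ∧ pvEdge n r c = 0 ∧
          pvValue n r c = b + (r - 2 * s) + 1) ∨
       (c ≠ s ∧ r = n - 1 - s ∧ s + 1 ≤ c ∧ c ≤ n - 1 - 2 * s ∧ pvEdge n r c = 1 ∧
          pvValue n r c = b + m + (c - s)) ∨
       (c ≠ s ∧ r ≠ n - 1 - s ∧ r - c = s ∧ 2 * s + 1 ≤ r ∧ r ≤ n - 2 - s ∧ pvEdge n r c = 2 ∧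
          pvValue n r c = b + 3 * m - 2 - (r - 2 * s))) := by
  obtain ⟨hc0, hcr, hrn⟩ := h
  obtain ⟨k1, hk1⟩ := Int.even_mul_succ_self n
  obtain ⟨k2, hk2⟩ :=
    Int.even_mul_succ_self (n - 3 * min c (min (n - 1 - r) (r - c)))
  have hb : PySem.Int.floordiv
      (n * (n + 1) - (n - 3 * min c (min (n - 1 - r) (r - c))) *
        (n - 3 * min c (min (n - 1 - r) (r - c)) + 1)) 2 = k1 - k2 :=
    pv_half _ _ (by omega)
  refine ⟨_, _, k1 - k2, rfl, rfl, by omega, by omega, by omega, ?_⟩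
  simp only [pvValue, pvEdge]
  rw [hb]
  split_ifs with h1 h2
  · exact Or.inl ⟨by omega, by omega, by omega, rfl, rfl⟩
  · exact Or.inr (Or.inl ⟨by omega, h2, by omega, by omega, rfl, rfl⟩)
  · exact Or.inr (Or.inr ⟨by omega, h2, by omega, by omega, by omega, rfl, rfl⟩)

lemma pvValue_bounds (n r c : Int) (h : pvTri n r c) :
    1 ≤ pvValue n r c ∧ pvValue n r c ≤ pvTot n := by
  obtain ⟨s, m, b, hs, hm, hb, hs0, hm1, hbr⟩ := pvValue_spec n r c h
  have htot := pvTot_even n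
  have h1 : 0 ≤ (n - m) * (n + m + 1) := mul_nonneg (by omega) (by omega)
  have h2 : (n - m) * (n + m + 1) = n * (n + 1) - m * (m + 1) := by ring
  have h3 : 0 ≤ (m - 1) * m := mul_nonneg (by omega) (by omega)
  have h4 : (m - 1) * m = m * (m + 1) - 2 * m := by ring
  have h5 := pv_consec1 m
  have h6 : (m - 1) * (m - 2) = m * (m + 1) - (4 * m - 2) := by ring
  have h7 := pv_consec2 m
  have h8 : (m - 2) * (m - 3) = m * (m + 1) - (6 * m - 6) := by ring
  rcases hbr with ⟨_, _, _, _, hv⟩ | ⟨_, _, _, _, _, hv⟩ | ⟨_, _, _, _, _, _, hv⟩ <;> omega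

lemma pvValue_inj (n r c r' c' : Int) (h : pvTri n r c) (h' : pvTri n r' c')
    (he : pvValue n r c = pvValue n r' c') : r = r' ∧ c = c' := by
  obtain ⟨s, m, b, hs, hm, hb, hs0, hm1, hbr⟩ := pvValue_spec n r c h
  obtain ⟨s', m', b', hs', hm', hb', hs0', hm1', hbr'⟩ := pvValue_spec n r' c' h'
  rcases lt_trichotomy s s' with hss | hss | hss
  · exfalso
    have hgap := pv_gap m' m hm1' (by omega)
    rcases hbr with ⟨_, _, _, _, hv⟩ | ⟨_, _, _, _, _, hv⟩ | ⟨_, _, _, _, _, _, hv⟩ <;>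
      rcases hbr' with ⟨_, _, _, _, hv'⟩ | ⟨_, _, _, _, _, hv'⟩ | ⟨_, _, _, _, _, _, hv'⟩ <;>
      omega
  · have hmm : m' = m := by omega
    subst hmm
    rcases hbr with ⟨_, _, _, _, hv⟩ | ⟨_, _, _, _, _, hv⟩ | ⟨_, _, _, _, _, _, hv⟩ <;>
      rcases hbr' with ⟨_, _, _, _, hv'⟩ | ⟨_, _, _, _, _, hv'⟩ | ⟨_, _, _, _, _, _, hv'⟩ <;>
      exact ⟨by omega, by omega⟩
  · exfalso
    have hgap := pv_gap m m' hm1 (by omega)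
    rcases hbr with ⟨_, _, _, _, hv⟩ | ⟨_, _, _, _, _, hv⟩ | ⟨_, _, _, _, _, _, hv⟩ <;>
      rcases hbr' with ⟨_, _, _, _, hv'⟩ | ⟨_, _, _, _, _, hv'⟩ | ⟨_, _, _, _, _, _, hv'⟩ <;>
      omega

lemma pvValue_zero_zero (n : Int) (hn : 1 ≤ n) : pvValue n 0 0 = 1 := by
  obtain ⟨s, m, b, hs, hm, hb, hs0, hm1, hbr⟩ :=
    pvValue_spec n 0 0 ⟨le_refl 0, le_refl 0, by omega⟩
  have hmm : m = n := by omega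
  subst hmm
  rcases hbr with ⟨_, _, _, _, hv⟩ | ⟨hc, _⟩ | ⟨hc, _⟩ <;> omega

lemma pvEdge_zero_zero (n : Int) (hn : 1 ≤ n) : pvEdge n 0 0 = 0 := by
  obtain ⟨s, m, b, hs, hm, hb, hs0, hm1, hbr⟩ :=
    pvValue_spec n 0 0 ⟨le_refl 0, le_refl 0, by omega⟩
  rcases hbr with ⟨_, _, _, he, _⟩ | ⟨hc, _⟩ | ⟨hc, _⟩ <;> omega

lemma pvEdge_range (n r c : Int) : pvEdge n r c = 0 ∨ pvEdge n r c = 1 ∨ pvEdge n r c = 2 := by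
  simp only [pvEdge]; split_ifs <;> simp

-- the arithmetic heart: from the cell written at step t, A's move reaches the unique
-- cell with value t+1, with the direction rule A uses
lemma pvStep_arith (n r c : Int) (h : pvTri n r c) (hlt : pvValue n r c < pvTot n) :
    (0 ≤ r + pvDr (pvEdge n r c) ∧ r + pvDr (pvEdge n r c) < n ∧
       0 ≤ c + pvDc (pvEdge n r c) ∧ c + pvDc (pvEdge n r c) < n ∧
       c + pvDc (pvEdge n r c) ≤ r + pvDr (pvEdge n r c) ∧
       pvValue n r c < pvValue n (r + pvDr (pvEdge n r c)) (c + pvDc (pvEdge n r c)) ∧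
       pvValue n (r + pvDr (pvEdge n r c)) (c + pvDc (pvEdge n r c)) = pvValue n r c + 1 ∧
       pvTri n (r + pvDr (pvEdge n r c)) (c + pvDc (pvEdge n r c)) ∧
       pvEdge n (r + pvDr (pvEdge n r c)) (c + pvDc (pvEdge n r c)) = pvEdge n r c) ∨
    (¬ (0 ≤ r + pvDr (pvEdge n r c) ∧ r + pvDr (pvEdge n r c) < n ∧
         0 ≤ c + pvDc (pvEdge n r c) ∧ c + pvDc (pvEdge n r c) < n ∧
         (c + pvDc (pvEdge n r c) ≤ r + pvDr (pvEdge n r c) →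
           pvValue n r c < pvValue n (r + pvDr (pvEdge n r c)) (c + pvDc (pvEdge n r c)))) ∧
       pvValue n (r + pvDr (pvNext (pvEdge n r c))) (c + pvDc (pvNext (pvEdge n r c))) =
         pvValue n r c + 1 ∧
       pvTri n (r + pvDr (pvNext (pvEdge n r c))) (c + pvDc (pvNext (pvEdge n r c))) ∧
       pvEdge n (r + pvDr (pvNext (pvEdge n r c))) (c + pvDc (pvNext (pvEdge n r c))) =
         pvNext (pvEdge n r c)) := by
  obtain ⟨s, m, b, hs, hm, hb, hs0, hm1, hbr⟩ := pvValue_spec n r c h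
  have htot := pvTot_even n
  rcases hbr with ⟨hc, hra, hrb, hE, hv⟩ | ⟨hc, hr, hca, hcb, hE, hv⟩ |
    ⟨hc, hr, hrc, hra, hrb, hE, hv⟩
  · -- moving down
    rw [hE]; norm_num [pvDr, pvDc, pvNext]
    by_cases hcorner : r = n - 1 - s
    · -- bottom of the down leg: bounce to direction 1, next cell (r, c+1)
      have hm2 : 2 ≤ m := by
        by_contra hx
        have h1 : m = 1 := by omega
        have hq1 : m * (m + 1) = 2 := by rw [h1]; norm_num
        omega
      right
      constructor
      · by_cases hsz : s = 0
        · intro h1 h2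
          exact absurd h2 (by omega)
        · intro h1 h2 h3 h4
          refine ⟨by omega, ?_⟩
          have htri3 : pvTri n (r + 1) c := ⟨by omega, by omega, by omega⟩
          obtain ⟨s₃, m₃, b₃, hs₃, hm₃, hb₃, hs₃0, hm₃1, hbr₃⟩ := pvValue_spec n (r + 1) c htri3
          have hseq : s₃ = s - 1 := by omega
          have hmeq : m₃ = m + 3 := by omega
          have hq : m₃ * (m₃ + 1) = m * (m + 1) + (6 * m + 12) := by rw [hmeq]; ring
          rcases hbr₃ with ⟨h₃, _, _, _, hv₃⟩ | ⟨_, _, _, _, _, hv₃⟩ |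
            ⟨_, h₃, _, _, _, _, hv₃⟩ <;> omega
      · have htri2 : pvTri n r (c + 1) := ⟨by omega, by omega, by omega⟩
        obtain ⟨s₂, m₂, b₂, hs₂, hm₂, hb₂, hs₂0, hm₂1, hbr₂⟩ := pvValue_spec n r (c + 1) htri2
        have hseq : s₂ = s := by omega
        subst hseq
        have hmeq : m₂ = m := by omega
        subst hmeq
        have hbeq : b₂ = b := by omega
        subst hbeq
        rcases hbr₂ with ⟨h₂, _, _, _, hv₂⟩ | ⟨_, _, _, _, hE₂, hv₂⟩ |
          ⟨_, h₂, _, _, _, _, hv₂⟩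
        · omega
        · exact ⟨by omega, htri2, by omega⟩
        · omega
    · -- mid-leg: continue down to (r+1, c)
      left
      have htri1 : pvTri n (r + 1) c := ⟨by omega, by omega, by omega⟩
      obtain ⟨s₁, m₁, b₁, hs₁, hm₁, hb₁, hs₁0, hm₁1, hbr₁⟩ := pvValue_spec n (r + 1) c htri1
      have hseq : s₁ = s := by omega
      subst hseq
      have hmeq : m₁ = m := by omega
      subst hmeq
      have hbeq : b₁ = b := by omega
      subst hbeq
      rcases hbr₁ with ⟨_, _, _, hE₁, hv₁⟩ | ⟨h₁, _⟩ | ⟨h₁, _⟩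
      · exact ⟨by omega, by omega, by omega, by omega, by omega, by omega, by omega, htri1,
          by omega⟩
      · omega
      · omega
  · -- moving right
    rw [hE]; norm_num [pvDr, pvDc, pvNext]
    rw [show r + -1 = r - 1 from by ring, show c + -1 = c - 1 from by ring]
    by_cases hcorner : c = n - 1 - 2 * s
    · -- bottom-right corner: bounce to direction 2, next cell (r-1, c-1)
      have hm3 : 3 ≤ m := by
        by_contra hx
        have h1 : m = 1 ∨ m = 2 := by omega
        rcases h1 with h1 | h1 <;>
          (have hq1 : m * (m + 1) = m + m * m := by ring) <;> nlinarith [hq1]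
      right
      constructor
      · by_cases hsz : s = 0
        · intro h1 h2 h3 h4
          exact absurd h4 (by omega)
        · intro h1 h2 h3 h4
          refine ⟨by omega, ?_⟩
          have htri3 : pvTri n r (c + 1) := ⟨by omega, by omega, by omega⟩
          obtain ⟨s₃, m₃, b₃, hs₃, hm₃, hb₃, hs₃0, hm₃1, hbr₃⟩ := pvValue_spec n r (c + 1) htri3
          have hseq : s₃ = s - 1 := by omega
          have hmeq : m₃ = m + 3 := by omega
          have hq : m₃ * (m₃ + 1) = m * (m + 1) + (6 * m + 12) := by rw [hmeq]; ring
          rcases hbr₃ with ⟨h₃, _, _, _, hv₃⟩ | ⟨_, h₃, _, _, _, hv₃⟩ |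
            ⟨_, _, _, _, _, _, hv₃⟩ <;> omega
      · have htri2 : pvTri n (r - 1) (c - 1) := ⟨by omega, by omega, by omega⟩
        obtain ⟨s₂, m₂, b₂, hs₂, hm₂, hb₂, hs₂0, hm₂1, hbr₂⟩ :=
          pvValue_spec n (r - 1) (c - 1) htri2
        have hseq : s₂ = s := by omega
        subst hseq
        have hmeq : m₂ = m := by omega
        subst hmeq
        have hbeq : b₂ = b := by omega
        subst hbeq
        rcases hbr₂ with ⟨h₂, _, _, _, hv₂⟩ | ⟨_, h₂, _, _, _, hv₂⟩ |
          ⟨_, _, _, _, _, hE₂, hv₂⟩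
        · omega
        · omega
        · exact ⟨by omega, htri2, by omega⟩
    · -- mid-leg: continue right to (r, c+1)
      left
      have htri1 : pvTri n r (c + 1) := ⟨by omega, by omega, by omega⟩
      obtain ⟨s₁, m₁, b₁, hs₁, hm₁, hb₁, hs₁0, hm₁1, hbr₁⟩ := pvValue_spec n r (c + 1) htri1
      have hseq : s₁ = s := by omega
      subst hseq
      have hmeq : m₁ = m := by omega
      subst hmeq
      have hbeq : b₁ = b := by omega
      subst hbeq
      rcases hbr₁ with ⟨h₁, _⟩ | ⟨_, _, _, _, hE₁, hv₁⟩ | ⟨_, h₁, _⟩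
      · omega
      · exact ⟨by omega, by omega, by omega, by omega, by omega, by omega, by omega, htri1,
          by omega⟩
      · omega
  · -- moving up-left along the diagonal
    rw [hE]; norm_num [pvDr, pvDc, pvNext]
    rw [show r + -1 = r - 1 from by ring, show c + -1 = c - 1 from by ring]
    by_cases hcorner : r = 2 * s + 1
    · -- top of the diagonal: bounce to direction 0, next cell (r+1, c)
      have hm4 : 4 ≤ m := by
        by_contra hx
        have h1 : m = 3 := by omega
        have hq1 : m * (m + 1) = 12 := by rw [h1]; norm_num
        omega
      right
      constructor
      · intro h1 h2 h3 h4
        refine ⟨by omega, ?_⟩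
        have htri3 : pvTri n (r - 1) (c - 1) := ⟨by omega, by omega, by omega⟩
        obtain ⟨s₃, m₃, b₃, hs₃, hm₃, hb₃, hs₃0, hm₃1, hbr₃⟩ :=
          pvValue_spec n (r - 1) (c - 1) htri3
        have hseq : s₃ = s := by omega
        subst hseq
        have hmeq : m₃ = m := by omega
        subst hmeq
        have hbeq : b₃ = b := by omega
        subst hbeq
        rcases hbr₃ with ⟨_, _, _, _, hv₃⟩ | ⟨h₃, _, _, _, _, hv₃⟩ |
          ⟨h₃, _, _, _, _, _, hv₃⟩ <;> omega
      · have htri2 : pvTri n (r + 1) c := ⟨by omega, by omega, by omega⟩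
        obtain ⟨s₂, m₂, b₂, hs₂, hm₂, hb₂, hs₂0, hm₂1, hbr₂⟩ := pvValue_spec n (r + 1) c htri2
        have hseq : s₂ = s + 1 := by omega
        have hmeq : m₂ = m - 3 := by omega
        have hq : m₂ * (m₂ + 1) = m * (m + 1) - (6 * m - 6) := by rw [hmeq]; ring
        rcases hbr₂ with ⟨_, _, _, hE₂, hv₂⟩ | ⟨h₂, _, _, _, _, hv₂⟩ |
          ⟨h₂, _, _, _, _, _, hv₂⟩
        · exact ⟨by omega, htri2, by omega⟩
        · omega
        · omega
    · -- mid-leg: continue diagonally to (r-1, c-1)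
      left
      have htri1 : pvTri n (r - 1) (c - 1) := ⟨by omega, by omega, by omega⟩
      obtain ⟨s₁, m₁, b₁, hs₁, hm₁, hb₁, hs₁0, hm₁1, hbr₁⟩ :=
        pvValue_spec n (r - 1) (c - 1) htri1
      have hseq : s₁ = s := by omega
      subst hseq
      have hmeq : m₁ = m := by omega
      subst hmeq
      have hbeq : b₁ = b := by omega
      subst hbeq
      rcases hbr₁ with ⟨h₁, _⟩ | ⟨_, h₁, _⟩ | ⟨_, _, _, _, _, hE₁, hv₁⟩
      · omega
      · omega
      · exact ⟨by omega, by omega, by omega, by omega, by omega, by omega, by omega, htri1,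
          by omega⟩

-- grid access / update
lemma pvGrid_get (n : Int) (f : Int → Int → Int) (r c d : Int) (hr : 0 ≤ r) (hrn : r < n)
    (hc : 0 ≤ c) (hcn : c < n) :
    PySem.List.pyGetD (PySem.List.pyGetD (pvGrid n f) r []) c d = f r c := by
  obtain ⟨i, rfl⟩ : ∃ k : Nat, r = (k : Int) := ⟨r.toNat, by omega⟩
  obtain ⟨j, rfl⟩ : ∃ k : Nat, c = (k : Int) := ⟨c.toNat, by omega⟩
  have hi : i < n.toNat := by omega
  have hj : j < n.toNat := by omega
  simp [pvGrid, List.getD_eq_getElem?_getD, hi, hj]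

lemma pvGrid_row (n : Int) (f : Int → Int → Int) (a : Nat) (ha : a < n.toNat) :
    PySem.List.pyGetD (pvGrid n f) (a : Int) [] =
      (List.range n.toNat).map (fun c : Nat => f ↑a ↑c) := by
  simp [pvGrid, List.getD_eq_getElem?_getD, ha]

lemma pvGrid_set (n : Int) (f : Int → Int → Int) (r c v : Int) (hr : 0 ≤ r) (hrn : r < n)
    (hc : 0 ≤ c) (hcn : c < n) :
    pvSet2 (pvGrid n f) r c v =
      pvGrid n (fun x y => if x = r ∧ y = c then v else f x y) := by
  obtain ⟨a, rfl⟩ : ∃ k : Nat, r = (k : Int) := ⟨r.toNat, by omega⟩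
  obtain ⟨b, rfl⟩ : ∃ k : Nat, c = (k : Int) := ⟨c.toNat, by omega⟩
  have ha : a < n.toNat := by omega
  have hb : b < n.toNat := by omega
  unfold pvSet2
  rw [pvGrid_row n f a ha]
  simp only [PySem.List.pySetD_natCast]
  unfold pvGrid
  apply List.ext_getElem (by simp)
  intro i hi1 hi2
  simp only [List.length_map, List.length_range] at hi2
  rw [List.getElem_set]
  by_cases hia : a = i
  · subst hia
    rw [if_pos rfl, List.getElem_map, List.getElem_range]
    apply List.ext_getElem (by simp)
    intro j hj1 hj2
    simp only [List.length_map, List.length_range] at hj2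
    simp only [List.getElem_set, List.getElem_map, List.getElem_range]
    by_cases hjb : b = j
    · subst hjb
      simp
    · rw [if_neg hjb, if_neg (by rintro ⟨-, h2⟩; exact hjb (by omega))]
  · rw [if_neg hia]
    simp only [List.getElem_map, List.getElem_range]
    apply List.map_congr_left
    intro j hj
    have hne : ¬((↑i : Int) = ↑a ∧ (↑j : Int) = ↑b) := by rintro ⟨h1, -⟩; exact hia (by omega)
    simp
    exact fun h1 _ => absurd h1.symm hia

lemma pvGrid_congr (n : Int) (f g : Int → Int → Int)
    (h : ∀ r c, 0 ≤ r → r < n → 0 ≤ c → c < n → f r c = g r c) : pvGrid n f = pvGrid n g := by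
  unfold pvGrid
  apply List.map_congr_left
  intro k hk
  rw [List.mem_range] at hk
  apply List.map_congr_left
  intro j hj
  rw [List.mem_range] at hj
  exact h _ _ (by omega) (by omega) (by omega) (by omega)

lemma pvMask_update (n t r2 c2 : Int) (h2 : pvTri n r2 c2) (hv : pvValue n r2 c2 = t + 1) :
    pvGrid n (fun x y => if x = r2 ∧ y = c2 then t + 1 else pvMask n t x y) =
      pvGrid n (pvMask n (t + 1)) := by
  apply pvGrid_congr
  intro x y hx hxn hy hyn
  by_cases hxy : x = r2 ∧ y = c2
  · rw [if_pos hxy]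
    obtain ⟨hx1, hy1⟩ := hxy
    subst hx1; subst hy1
    unfold pvMask
    rw [if_pos h2.2.1, if_pos (by omega)]
    omega
  · rw [if_neg hxy]
    unfold pvMask
    by_cases hyx : y ≤ x
    · rw [if_pos hyx, if_pos hyx]
      have htri : pvTri n x y := ⟨hy, hyx, hxn⟩
      by_cases hvt : pvValue n x y ≤ t
      · rw [if_pos hvt, if_pos (by omega)]
      · rw [if_neg hvt, if_neg ?_]
        intro hle
        have hne := pvValue_inj n x y r2 c2 htri h2 (by omega)
        exact hxy ⟨hne.1, hne.2⟩
    · rw [if_neg hyx, if_neg hyx]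

lemma pv_dir_r (d : Int) (h : d = 0 ∨ d = 1 ∨ d = 2) :
    PySem.List.pyGetD [1, 0, -1] d 0 = pvDr d := by
  rcases h with h | h | h <;> subst h <;> decide

lemma pv_dir_c (d : Int) (h : d = 0 ∨ d = 1 ∨ d = 2) :
    PySem.List.pyGetD [0, 1, -1] d 0 = pvDc d := by
  rcases h with h | h | h <;> subst h <;> decide

lemma pv_mod3 (d : Int) (h : d = 0 ∨ d = 1 ∨ d = 2) :
    PySem.Int.mod (d + 1) 3 = pvNext d := by
  rcases h with h | h | h <;> subst h <;> decide

lemma pvNext_range (d : Int) (h : d = 0 ∨ d = 1 ∨ d = 2) :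
    pvNext d = 0 ∨ pvNext d = 1 ∨ pvNext d = 2 := by
  rcases h with h | h | h <;> subst h <;> decide

-- one loop step preserves the invariant
lemma pvStep_inv (n t : Int) (st : List (List Int) × Int × Int × Int) (_hn : 1 ≤ n)
    (hinv : pvInv n t st) (hlt : t < pvTot n) : pvInv n (t + 1) (pvStep n st (t + 1)) := by
  obtain ⟨arr, r, c, d⟩ := st
  obtain ⟨harr, htri, hval, hdir⟩ := hinv
  simp only at harr htri hval hdir
  have hrange := pvEdge_range n r c
  have hdrange : d = 0 ∨ d = 1 ∨ d = 2 := by omega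
  have hdr := pv_dir_r d hdrange
  have hdc := pv_dir_c d hdrange
  have hmod := pv_mod3 d hdrange
  have hdr2 := pv_dir_r (pvNext d) (pvNext_range d hdrange)
  have hdc2 := pv_dir_c (pvNext d) (pvNext_range d hdrange)
  have harith := pvStep_arith n r c htri (by omega)
  rw [← hdir] at harith
  unfold pvStep
  simp only
  rw [hdr, hdc]
  rcases harith with
    ⟨hA1, hA2, hA3, hA4, hA5, hA6, hA7, hA8, hA9⟩ | ⟨hB1, hB2, hB3, hB4⟩
  · rw [if_pos ?_]
    · refine ⟨?_, hA8, by dsimp only; omega, by dsimp only; omega⟩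
      simp only
      rw [harr, pvGrid_set n _ _ _ _ hA1 hA2 hA3 hA4, pvMask_update n t _ _ hA8 (by omega)]
    · refine ⟨hA1, hA2, hA3, hA4, ?_⟩
      rw [harr, pvGrid_get n _ _ _ 0 hA1 hA2 hA3 hA4]
      unfold pvMask
      rw [if_pos hA5, if_neg (by omega)]
  · rw [if_neg ?_]
    · rw [hmod, hdr2, hdc2]
      refine ⟨?_, hB3, by dsimp only; omega, by dsimp only; omega⟩
      simp only
      have hr2 : 0 ≤ r + pvDr (pvNext d) := le_trans hB3.1 hB3.2.1
      have hr2n : r + pvDr (pvNext d) < n := hB3.2.2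
      have hc2 : 0 ≤ c + pvDc (pvNext d) := hB3.1
      have hc2n : c + pvDc (pvNext d) < n := lt_of_le_of_lt hB3.2.1 hB3.2.2
      rw [harr, pvGrid_set n _ _ _ _ hr2 hr2n hc2 hc2n,
        pvMask_update n t _ _ hB3 (by omega)]
    · rintro ⟨g1, g2, g3, g4, g5⟩
      rw [harr, pvGrid_get n _ _ _ 0 g1 g2 g3 g4] at g5
      unfold pvMask at g5
      apply hB1
      refine ⟨g1, g2, g3, g4, fun hcle => ?_⟩
      rw [if_pos hcle] at g5
      by_cases hvt : pvValue n (r + pvDr d) (c + pvDc d) ≤ t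
      · rw [if_pos hvt] at g5
        have := pvValue_bounds n _ _ ⟨g3, hcle, g2⟩
        omega
      · omega

-- folding the loop from any invariant state reaches the final invariant
lemma pvFold_inv (n : Int) (hn : 1 ≤ n) (k : Nat) : ∀ (t : Int) (st : List (List Int) × Int × Int × Int),
    pvInv n t st → t + k = pvTot n →
    pvInv n (pvTot n) ((PySem.List.pyRange (t + 1) (pvTot n + 1) 1).foldl (pvStep n) st) := by
  induction k with
  | zero =>
    intro t st hinv hk
    obtain rfl : t = pvTot n := by omega
    rw [PySem.List.pyRange_one_eq_nil (by omega)]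
    exact hinv
  | succ k ih =>
    intro t st hinv hk
    rw [PySem.List.pyRange_one_cons (by omega)]
    rw [List.foldl_cons]
    have h2 := ih (t + 1) (pvStep n st (t + 1)) (pvStep_inv n t st hn hinv (by omega)) (by omega)
    rw [show t + 1 + 1 = t + 2 from by ring] at h2
    rw [show t + 1 + 1 = t + 2 from by ring]
    exact h2

-- the initial array is the mask at time 0, and after arr[0][0] = 1 the mask at time 1
lemma pvInit (n : Int) (hn : 1 ≤ n) :
    pvSet2 ((PySem.List.pyRange 1 (n + 1) 1).map
        (fun k => List.replicate k.toNat (0 : Int) ++ List.replicate (n - k).toNat (-1 : Int)))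
      0 0 1 = pvGrid n (pvMask n 1) := by
  have h0 : (PySem.List.pyRange 1 (n + 1) 1).map
      (fun k => List.replicate k.toNat (0 : Int) ++ List.replicate (n - k).toNat (-1 : Int)) =
      pvGrid n (pvMask n 0) := by
    rw [PySem.List.pyRange_one]
    unfold pvGrid
    rw [List.map_map, show (n + 1 - 1).toNat = n.toNat from by omega]
    apply List.map_congr_left
    intro k hk
    rw [List.mem_range] at hk
    simp only [Function.comp]
    apply List.ext_getElem (by simp; omega)
    intro j hj1 hj2
    simp only [List.length_map, List.length_range] at hj2
    rw [List.getElem_map, List.getElem_range]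
    by_cases hjk : j ≤ k
    · rw [List.getElem_append_left (by simp; omega), List.getElem_replicate]
      have hb := (pvValue_bounds n ↑k ↑j ⟨by omega, by omega, by omega⟩).1
      unfold pvMask
      rw [if_pos (by omega), if_neg (by omega)]
    · rw [List.getElem_append_right (by simp; omega), List.getElem_replicate]
      unfold pvMask
      rw [if_neg (by omega)]
  rw [h0, pvGrid_set n _ _ _ _ (by omega) (by omega) (by omega) (by omega)]
  have hupd := pvMask_update n 0 0 0 ⟨le_refl 0, le_refl 0, by omega⟩
    (by have := pvValue_zero_zero n hn; omega)
  norm_num at hupd ⊢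
  convert hupd using 2

lemma pv_foldl_ite (num : Int) (f : Int → Int) : ∀ (l : List Int) (acc : List Int),
    l.foldl (fun res x => if x ≤ num then res ++ [f x] else res) acc
      = acc ++ (l.filter (fun x => decide (x ≤ num))).map f := by
  intro l
  induction l with
  | nil => simp
  | cons x xs ih =>
    intro acc
    simp only [List.foldl_cons, List.filter_cons]
    by_cases hx : x ≤ num
    · rw [if_pos hx, ih]
      simp [hx]
    · rw [if_neg hx, ih]
      simp [hx]

lemma pv_filter_range (n num : Int) (h0 : 0 ≤ num) (h1 : num < n) :
    (PySem.List.pyRange 0 n 1).filter (fun x => decide (x ≤ num)) =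
      PySem.List.pyRange 0 (num + 1) 1 := by
  rw [PySem.List.pyRange_one_append 0 (num + 1) n (by omega) (by omega), List.filter_append]
  rw [List.filter_eq_self.mpr, List.filter_eq_nil_iff.mpr, List.append_nil]
  · intro x hx
    rw [PySem.List.mem_pyRange_one] at hx
    simp; omega
  · intro x hx
    rw [PySem.List.mem_pyRange_one] at hx
    simp; omega

-- reading the lower triangle of the final mask is B's output
lemma pvRead (n : Int) (_hn : 1 ≤ n) :
    (PySem.List.pyRange 0 n 1).foldl (fun res num =>
      (PySem.List.pyRange 0 n 1).foldl (fun res num2 =>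
        if num2 ≤ num then
          res ++ [PySem.List.pyGetD (PySem.List.pyGetD (pvGrid n (pvMask n (pvTot n))) num []) num2 0]
        else res) res) [] = solution_alt n := by
  have hR : solution_alt n = (PySem.List.pyRange 0 n 1).foldl
      (fun res num =>
        res ++ (PySem.List.pyRange 0 (num + 1) 1).map (fun num2 => pvValue n num num2)) [] := by
    unfold solution_alt
    apply PySem.List.foldl_congr_mem
    intro acc r hr
    exact PySem.List.foldl_append_singleton_eq_map _ _ _
  rw [hR]
  apply PySem.List.foldl_congr_mem
  intro acc num hmem
  rw [PySem.List.mem_pyRange_one] at hmem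
  have hstep : ∀ (acc2 : List Int), ∀ num2 ∈ PySem.List.pyRange 0 n 1,
      (if num2 ≤ num then
        acc2 ++ [PySem.List.pyGetD
          (PySem.List.pyGetD (pvGrid n (pvMask n (pvTot n))) num []) num2 0]
      else acc2) =
      (if num2 ≤ num then acc2 ++ [pvValue n num num2] else acc2) := by
    intro acc2 num2 hmem2
    rw [PySem.List.mem_pyRange_one] at hmem2
    by_cases hle : num2 ≤ num
    · rw [if_pos hle, if_pos hle,
        pvGrid_get n _ _ _ 0 (by omega) (by omega) (by omega) (by omega)]
      unfold pvMask
      rw [if_pos hle, if_pos ((pvValue_bounds n num num2 ⟨by omega, hle, by omega⟩).2)]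
    · rw [if_neg hle, if_neg hle]
  rw [PySem.List.foldl_congr_mem _ _ _ _ hstep]
  rw [pv_foldl_ite, pv_filter_range n num (by omega) (by omega)]

-- ===== VERDICT (by name: the statement is the Claim_ definition above) =====
theorem solution_spec : Claim_equal_solution := by
  unfold Claim_equal_solution
  intro n hdom hn
  unfold Spec_solution
  have hn' : (1 : Int) ≤ n := hn
  unfold solution
  simp only
  rw [pvInit n hn']
  rw [show PySem.Int.floordiv (n * (n + 1)) 2 = pvTot n from rfl]
  have h1 := pvFold_inv n hn' (pvTot n - 1).toNat 1 (pvGrid n (pvMask n 1), 0, 0, 0)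
    ⟨rfl, ⟨le_refl 0, le_refl 0, by dsimp only; omega⟩,
      by dsimp only; exact pvValue_zero_zero n hn',
      by dsimp only; exact (pvEdge_zero_zero n hn').symm⟩
    (by
      have h2 : 2 ≤ n * (n + 1) := by nlinarith
      have := pvTot_even n
      omega)
  norm_num at h1
  unfold pvInv at h1
  rw [h1.1]
  exact pvRead n hn'
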